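-- pv_equiv track=rewrite | github.com/joshanashakya/dissertation | workspace/dataset/java-python/GeeksForGeeks/3060/A/2.py | squareDigitSum
-- ===== SOURCE A (Python) =====
-- def squareDigitSum(num):
--
--     summ = 0
--     num = int(num)
--
--     # Store the square of num
--     squareNum = num * num
--
--     # Find the sum of its digits
--     while squareNum > 0:
--         summ = summ + (squareNum % 10)
--         squareNum = squareNum//10
--
--     return summ
-- ===== SOURCE B (Python) =====
-- def squareDigitSum(num):
--     sq = int(num) * int(num)
--     return sum(int(c) for c in str(sq))
-- ===== Notes on version B (the rewrite author's own statement) =====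
-- stated objective: idiomatic
-- what changed: B computes the square once and sums the digits of its decimal string representation instead of peeling digits arithmetically with mod/floor-division over a running quotient.
import Mathlib
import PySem

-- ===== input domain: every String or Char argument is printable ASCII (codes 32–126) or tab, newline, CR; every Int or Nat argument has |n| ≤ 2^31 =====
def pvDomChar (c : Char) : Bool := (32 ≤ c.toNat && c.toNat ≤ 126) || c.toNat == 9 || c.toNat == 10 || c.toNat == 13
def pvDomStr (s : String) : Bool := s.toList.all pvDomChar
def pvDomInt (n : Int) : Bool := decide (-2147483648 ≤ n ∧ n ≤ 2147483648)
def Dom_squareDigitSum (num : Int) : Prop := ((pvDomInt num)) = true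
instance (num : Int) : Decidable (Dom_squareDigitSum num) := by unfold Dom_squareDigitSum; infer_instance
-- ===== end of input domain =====

-- B computes the square once and sums the digits of its decimal string (str) instead of peeling
-- digits with a mod/floor-division loop over a running quotient; same return value, no speed claim.


-- ===== PORT A =====
-- the 'while squareNum > 0' loop; state is (summ, squareNum)
def squareDigitSumLoop (summ squareNum : Int) : Int :=
  if 0 < squareNum then
    squareDigitSumLoop (summ + PySem.Int.mod squareNum 10) (PySem.Int.floordiv squareNum 10)
  else summ
termination_by squareNum.toNat
decreasing_by
  rw [PySem.Int.floordiv_eq_ediv_of_pos (by omega)]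
  omega

def squareDigitSum (num : Int) : Int :=
  squareDigitSumLoop 0 (num * num)

-- ===== PORT B =====
-- sum(int(c) for c in str(sq)); int(c) on a decimal digit character is exactly ord(c) - 48
def squareDigitSum_alt (num : Int) : Int :=
  let sq := num * num
  (((PySem.Int.toStr sq).toList.map (fun c => ((c.toNat : Int) - 48))).sum)

-- ===== PRECONDITION & SPEC =====
def Spec_squareDigitSum (num : Int) (out : Int) : Prop := out = squareDigitSum_alt num
instance (num : Int) (out : Int) : Decidable (Spec_squareDigitSum num out) := by unfold Spec_squareDigitSum; infer_instance

-- ===== CLAIM (what is proved, stated in full; the proofs are below) =====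
def Claim_equal_squareDigitSum : Prop := ∀ (num : Int), Dom_squareDigitSum num → Spec_squareDigitSum num (squareDigitSum num)

-- ===== LEMMAS AND PROOFS =====

-- mathematical digit sum of a natural number
def dsum (n : Nat) : Nat :=
  if n = 0 then 0 else n % 10 + dsum (n / 10)
termination_by n
decreasing_by omega

def charSum (cs : List Char) : Int := (cs.map (fun c => ((c.toNat : Int) - 48))).sum

lemma digitChar_val (d : Nat) (h : d < 10) : ((Nat.digitChar d).toNat : Int) - 48 = (d : Int) := by
  interval_cases d <;> decide

lemma charSum_cons (c : Char) (cs : List Char) :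
    charSum (c :: cs) = ((c.toNat : Int) - 48) + charSum cs := by
  simp [charSum]

lemma toDigitsCore_charSum (fuel : Nat) :
    ∀ (n : Nat) (ds : List Char), n < fuel →
      charSum (Nat.toDigitsCore 10 fuel n ds) = (dsum n : Int) + charSum ds := by
  induction fuel with
  | zero => intro n ds h; omega
  | succ fuel ih =>
    intro n ds _
    rw [Nat.toDigitsCore]
    by_cases h10 : n / 10 = 0
    · simp only [h10, if_true]
      rw [charSum_cons, digitChar_val _ (Nat.mod_lt _ (by omega))]
      have : dsum n = n % 10 := by
        rw [dsum]
        by_cases hn : n = 0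
        · simp [hn]
        · simp [hn, h10, dsum]
      rw [this]
    · simp only [if_neg h10]
      rw [ih (n / 10) _ (by omega)]
      rw [charSum_cons, digitChar_val _ (Nat.mod_lt _ (by omega))]
      have hn : n ≠ 0 := by omega
      conv_rhs => rw [dsum, if_neg hn]
      push_cast
      ring

lemma charSum_toDigits (n : Nat) : charSum (Nat.toDigits 10 n) = (dsum n : Int) := by
  have := toDigitsCore_charSum (n + 1) n [] (by omega)
  simpa [Nat.toDigits, charSum] using this

lemma loop_eq_dsum (summ sq : Int) (h : 0 ≤ sq) :
    squareDigitSumLoop summ sq = summ + (dsum sq.toNat : Int) := by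
  by_cases hp : 0 < sq
  · rw [squareDigitSumLoop, if_pos hp]
    have hd : PySem.Int.floordiv sq 10 = sq / 10 :=
      PySem.Int.floordiv_eq_ediv_of_pos (by omega)
    have hm : PySem.Int.mod sq 10 = sq % 10 :=
      PySem.Int.mod_eq_emod_of_pos (by omega)
    have hlt : (sq / 10).toNat < sq.toNat := by omega
    have hrec := loop_eq_dsum (summ + PySem.Int.mod sq 10) (PySem.Int.floordiv sq 10)
      (by rw [hd]; omega)
    rw [hrec, hd, hm]
    have hne : sq.toNat ≠ 0 := by omega
    conv_rhs => rw [dsum, if_neg hne]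
    have h1 : sq % 10 = ((sq.toNat % 10 : Nat) : Int) := by omega
    have h2 : (sq / 10).toNat = sq.toNat / 10 := by omega
    rw [h1, h2]
    push_cast
    ring
  · rw [squareDigitSumLoop, if_neg hp]
    have : sq.toNat = 0 := by omega
    rw [this, dsum]
    simp
termination_by sq.toNat
decreasing_by
  rw [PySem.Int.floordiv_eq_ediv_of_pos (by omega)]
  omega

-- ===== VERDICT (by name: the statement is the Claim_ definition above) =====
theorem squareDigitSum_spec : Claim_equal_squareDigitSum := by
  intro num _
  unfold Spec_squareDigitSum squareDigitSum squareDigitSum_alt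
  dsimp only
  have hsq : 0 ≤ num * num := mul_self_nonneg num
  rw [loop_eq_dsum 0 (num * num) hsq]
  have : (PySem.Int.toStr (num * num)).toList = Nat.toDigits 10 (num * num).toNat := by
    rw [PySem.Int.toList_toStr, PySem.Int.toChars, if_neg (by omega)]
  rw [this]
  have := charSum_toDigits (num * num).toNat
  simp only [charSum] at this
  rw [this]
  ring
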